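-- pv_equiv track=rewrite | github.com/yolo22nd/LOC-6.0 | backend/scraps/main.py | extract_product_request
-- ===== SOURCE A (Python) =====
-- def extract_product_request(query):
--     product_request = ""
--
--     # Split the query into individual words
--     words = query.lower().split()
--
--     # Define a set of keywords for product requests
--     product_keywords = ["a", "an", "buy", "purchase", "get", "find", "want", "looking", "for", "show", "display"]
--
--     # Find the relevant keywords and extract the product request
--     keyword_indices = [index for index, word in enumerate(words) if word in product_keywords]
--     if keyword_indices:
--         last_keyword_index = keyword_indices[-1]
--         product_request = " ".join(words[last_keyword_index + 1:])
--     else: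
--         product_request = query.strip()
--
--     return product_request
-- ===== SOURCE B (Python) =====
-- def extract_product_request(query):
--     # One forward pass: a buffer that resets on every keyword, plus a found flag.
--     keywords = {"a", "an", "buy", "purchase", "get", "find", "want", "looking",
--                 "for", "show", "display"}
--     buffer = []
--     found = False
--     for word in query.lower().split():
--         if word in keywords:
--             found = True
--             buffer = []
--         else:
--             buffer.append(word)
--     return " ".join(buffer) if found else query.strip()
-- ===== Notes on version B (the rewrite author's own statement) =====
-- stated objective: alternative
-- what changed: Replaces the collect-all-keyword-indices-then-slice-after-the-last decomposition with a single forward pass keeping a buffer that resets at each keyword and a found flag.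
import Mathlib
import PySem

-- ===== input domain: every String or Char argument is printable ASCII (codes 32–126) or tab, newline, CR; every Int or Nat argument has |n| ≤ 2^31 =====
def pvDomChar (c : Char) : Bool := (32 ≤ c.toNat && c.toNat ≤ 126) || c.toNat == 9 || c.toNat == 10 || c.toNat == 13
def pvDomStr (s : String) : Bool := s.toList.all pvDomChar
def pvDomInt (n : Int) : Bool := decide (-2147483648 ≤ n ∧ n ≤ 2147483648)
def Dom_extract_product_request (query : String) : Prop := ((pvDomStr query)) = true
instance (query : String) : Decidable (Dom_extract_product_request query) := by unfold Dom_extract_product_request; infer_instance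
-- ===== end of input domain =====

-- B is an alternative single-pass decomposition (buffer resetting at each keyword) of A's
-- collect-indices-then-slice algorithm; equivalence of the RETURN value is proved below.

-- ===== PORT A =====
def pvKeywordsA : List String :=
  ["a", "an", "buy", "purchase", "get", "find", "want", "looking", "for", "show", "display"]

def extract_product_request (query : String) : String :=
  let words := PySem.Str.split₀ (PySem.Str.lower query)
  let keyword_indices :=
    (PySem.List.enumerate words 0).filterMap
      (fun p => if p.2 ∈ pvKeywordsA then some p.1 else none)
  if keyword_indices ≠ [] then
    let last_keyword_index := PySem.List.pyGetD keyword_indices (-1) 0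
    PySem.Str.join " " (PySem.List.slice words (some (last_keyword_index + 1)) none)
  else
    PySem.Str.strip query

-- ===== PORT B =====
def pvKeywordsB : PySem.Set String :=
  PySem.Set.ofList
    ["a", "an", "buy", "purchase", "get", "find", "want", "looking", "for", "show", "display"]

def pvStepB (s : List String × Bool) (w : String) : List String × Bool :=
  if PySem.Set.contains pvKeywordsB w then ([], true) else (s.1 ++ [w], s.2)

def extract_product_request_alt (query : String) : String :=
  let st := (PySem.Str.split₀ (PySem.Str.lower query)).foldl pvStepB ([], false)
  if st.2 then PySem.Str.join " " st.1 else PySem.Str.strip query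

-- ===== PRECONDITION & SPEC =====
def Spec_extract_product_request (query : String) (out : String) : Prop := out = extract_product_request_alt query
instance (query : String) (out : String) : Decidable (Spec_extract_product_request query out) := by unfold Spec_extract_product_request; infer_instance

-- ===== CLAIM (what is proved, stated in full; the proofs are below) =====
def Claim_equal_extract_product_request : Prop := ∀ (query : String), Dom_extract_product_request query → Spec_extract_product_request query (extract_product_request query)

-- ===== LEMMAS AND PROOFS =====

-- indices produced by A's comprehension over an arbitrary word list
def pvIdxs (ws : List String) : List Int :=
  (PySem.List.enumerate ws 0).filterMap (fun p => if p.2 ∈ pvKeywordsA then some p.1 else none)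

lemma pvIdxs_append_singleton (ws : List String) (w : String) :
    pvIdxs (ws ++ [w]) =
      pvIdxs ws ++ (if w ∈ pvKeywordsA then [(ws.length : Int)] else []) := by
  unfold pvIdxs
  rw [PySem.List.enumerate_append, List.filterMap_append]
  congr 1
  by_cases h : w ∈ pvKeywordsA <;> simp [PySem.List.enumerate, h]

lemma pvIdxs_mem_lt (ws : List String) : ∀ i ∈ pvIdxs ws, 0 ≤ i ∧ i < (ws.length : Int) := by
  intro i hi
  unfold pvIdxs at hi
  simp only [List.mem_filterMap] at hi
  obtain ⟨p, hp, hpi⟩ := hi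
  rw [PySem.List.mem_enumerate_iff] at hp
  obtain ⟨k, hk, rfl⟩ := hp
  split_ifs at hpi with h
  simp at hpi
  subst hpi
  omega

lemma pvKeywordsB_mem_iff (w : String) :
    PySem.Set.contains pvKeywordsB w = true ↔ w ∈ pvKeywordsA := by
  rw [PySem.Set.contains_iff]
  unfold pvKeywordsB pvKeywordsA
  rw [PySem.Set.mem_ofList]

-- the core invariant: B's fold equals A's slice-after-last-keyword characterisation
lemma pvFold_eq (ws : List String) :
    ws.foldl pvStepB ([], false) =
      (if _h : pvIdxs ws ≠ [] then
        (PySem.List.slice ws (some (PySem.List.pyGetD (pvIdxs ws) (-1) 0 + 1)) none, true)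
      else (ws, false)) := by
  induction ws using List.reverseRecOn with
  | nil => simp [pvIdxs, PySem.List.enumerate]
  | append_singleton ws w ih =>
    rw [List.foldl_append, List.foldl_cons, List.foldl_nil, ih]
    have hidx := pvIdxs_append_singleton ws w
    by_cases hk : w ∈ pvKeywordsA
    · -- last word is a keyword: buffer resets, idxs gains ws.length as its last element
      have hstep : ∀ s : List String × Bool, pvStepB s w = ([], true) := by
        intro s; unfold pvStepB
        rw [if_pos ((pvKeywordsB_mem_iff w).mpr hk)]
      rw [hstep, hidx, if_pos hk,
        dif_pos (List.append_ne_nil_of_right_ne_nil _ (List.cons_ne_nil _ _))]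
      congr 1
      rw [PySem.List.pyGetD_neg_one_append_singleton]
      have hc : ((ws.length : Int) + 1) = ((ws.length + 1 : Nat) : Int) := by push_cast; ring
      rw [hc, PySem.List.slice_from_natCast]
      simp
    · -- last word is not a keyword: buffer extends by w, idxs unchanged
      have hstep : ∀ s : List String × Bool, pvStepB s w = (s.1 ++ [w], s.2) := by
        intro s; unfold pvStepB
        rw [if_neg (fun h => hk ((pvKeywordsB_mem_iff w).mp h))]
      rw [hidx, if_neg hk, List.append_nil]
      by_cases h1 : pvIdxs ws ≠ []
      · rw [dif_pos h1, dif_pos h1, hstep]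
        simp only
        congr 1
        -- slice (ws ++ [w]) (i+1) none = slice ws (i+1) none ++ [w], since i < ws.length
        set i := PySem.List.pyGetD (pvIdxs ws) (-1) 0 with hi
        have hmem : i ∈ pvIdxs ws := by
          apply PySem.List.pyGetD_mem
          unfold PySem.Raise.InRange
          have : 0 < (pvIdxs ws).length := List.length_pos_iff.mpr (by exact h1)
          simp
          omega
        obtain ⟨h0, hlt⟩ := pvIdxs_mem_lt ws i hmem
        have h2 : (0:Int) ≤ i + 1 := by omega
        rw [PySem.List.slice_from ws h2, PySem.List.slice_from (ws ++ [w]) h2]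
        rw [List.drop_append_of_le_length (by omega)]
      · rw [dif_neg h1, dif_neg h1, hstep]

theorem extract_product_request_spec : Claim_equal_extract_product_request := by
  intro query _
  unfold Spec_extract_product_request extract_product_request extract_product_request_alt
  simp only
  rw [show (PySem.List.enumerate (PySem.Str.split₀ (PySem.Str.lower query)) 0).filterMap
        (fun p => if p.2 ∈ pvKeywordsA then some p.1 else none)
      = pvIdxs (PySem.Str.split₀ (PySem.Str.lower query)) from rfl]
  rw [pvFold_eq]
  by_cases h : pvIdxs (PySem.Str.split₀ (PySem.Str.lower query)) ≠ [] <;> simp [h]
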